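-- pv_equiv track=rewrite | github.com/ms1011/Algorithm | 프로그래머스/0/120882. 등수 매기기/등수 매기기.py | solution
-- ===== SOURCE A (Python) =====
-- def solution(score):
--     answer = []
--     arr = sorted([sum(i) for i in score], reverse=True)
--     rank = {}
--     for i,  j in enumerate(arr):
--         if j not in rank:
--             rank[j] = i + 1
--     answer = [rank[sum(i)] for i in score]
--     return answer
-- ===== SOURCE B (Python) =====
-- def solution(score):
--     sums = [sum(row) for row in score]
--     return [1 + sum(t > s for t in sums) for s in sums]
-- ===== Notes on version B (the rewrite author's own statement) =====
-- stated objective: simpler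
-- what changed: Replaces sorting the sums descending and building a first-occurrence rank dict with a direct nested count: each row's rank is 1 plus the number of strictly greater row sums.
import Mathlib
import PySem

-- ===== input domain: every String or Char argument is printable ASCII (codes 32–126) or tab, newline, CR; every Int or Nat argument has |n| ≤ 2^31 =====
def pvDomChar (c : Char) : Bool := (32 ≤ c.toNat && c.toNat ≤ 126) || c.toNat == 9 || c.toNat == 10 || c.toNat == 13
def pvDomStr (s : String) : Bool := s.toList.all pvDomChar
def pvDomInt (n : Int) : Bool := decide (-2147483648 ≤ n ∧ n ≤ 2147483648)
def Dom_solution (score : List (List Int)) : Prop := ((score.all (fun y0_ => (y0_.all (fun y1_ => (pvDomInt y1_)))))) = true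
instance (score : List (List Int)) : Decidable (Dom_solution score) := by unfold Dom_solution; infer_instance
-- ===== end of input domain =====

-- B replaces A's sort + first-occurrence rank dict by a direct nested count (simpler, no sorting).


-- ===== PORT A =====
def solution (score : List (List Int)) : List Int :=
  let arr := PySem.List.sorted (score.map (fun i => i.sum)) (fun x => x) true
  let rank := (PySem.List.enumerate arr 0).foldl
      (fun r p => if ¬ r.contains p.2 then r.insert p.2 (p.1 + 1) else r)
      (PySem.Dict.empty : PySem.Dict Int Int)
  -- rank[sum(i)]: the key sum(i) is always present (every sum occurs in arr), so getD's default is never used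
  score.map (fun i => rank.getD i.sum 0)

-- ===== PORT B =====
def solution_alt (score : List (List Int)) : List Int :=
  let sums := score.map (fun row => row.sum)
  sums.map (fun s => 1 + (sums.countP (fun t => s < t) : Int))

-- ===== PRECONDITION & SPEC =====
def Spec_solution (score : List (List Int)) (out : List Int) : Prop := out = solution_alt score
instance (score : List (List Int)) (out : List Int) : Decidable (Spec_solution score out) := by unfold Spec_solution; infer_instance

-- ===== CLAIM (what is proved, stated in full; the proofs are below) =====
def Claim_equal_solution : Prop := ∀ (score : List (List Int)), Dom_solution score → Spec_solution score (solution score)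

-- ===== LEMMAS AND PROOFS =====

-- The fold over `enumerate arr n` records, for each key seen for the first time, its index + 1.
theorem rank_fold_getD (arr : List Int) (n : Int) (d : PySem.Dict Int Int) (s : Int) :
    ((PySem.List.enumerate arr n).foldl
      (fun r p => if ¬ r.contains p.2 then r.insert p.2 (p.1 + 1) else r) d).getD s 0 =
    if d.contains s then d.getD s 0
    else if s ∈ arr then n + (arr.idxOf s : Int) + 1 else 0 := by
  induction arr generalizing n d with
  | nil =>
    by_cases h : d.contains s <;>
      simp [PySem.List.enumerate_nil, h, PySem.Dict.getD_of_not_contains]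
  | cons x t ih =>
    rw [PySem.List.enumerate_cons, List.foldl_cons, ih]
    by_cases hsx : s = x
    · subst hsx
      by_cases h : d.contains s
      · simp [h]
      · simp [h, PySem.Dict.contains_insert_self, PySem.Dict.getD_insert_self]
    · have hc : ∀ v : Int, ((d.insert x v).contains s) = d.contains s := by
        intro v; rw [PySem.Dict.contains_insert]; simp [hsx]
      have hg : ∀ v : Int, (d.insert x v).getD s 0 = d.getD s 0 := by
        intro v; rw [PySem.Dict.getD_insert]; simp [hsx]
      have hidx : List.idxOf s (x :: t) = List.idxOf s t + 1 := by
        simp [Ne.symm hsx]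
      by_cases hx : d.contains x <;> by_cases h : d.contains s <;>
        by_cases hst : s ∈ t <;>
          simp [hx, h, hst, hc, hg, hsx, hidx] <;> omega

-- In a descending list, the first index of a member equals the number of strictly greater elements.
theorem idxOf_eq_countP_gt (arr : List Int) (s : Int)
    (hp : arr.Pairwise (fun a b => b ≤ a)) (hs : s ∈ arr) :
    arr.idxOf s = arr.countP (fun t => s < t) := by
  induction arr with
  | nil => simp at hs
  | cons a t ih =>
    rw [List.pairwise_cons] at hp
    by_cases hsa : s = a
    · subst hsa
      have hz : t.countP (fun t => decide (s < t)) = 0 := by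
        rw [List.countP_eq_zero]
        intro b hb
        simpa using not_lt.mpr (hp.1 b hb)
      simp [hz]
    · have hst : s ∈ t := by
        rcases List.mem_cons.mp hs with h | h
        · exact absurd h hsa
        · exact h
      have hlt : s < a := lt_of_le_of_ne (hp.1 s hst) hsa
      have hbeq : (a == s) = false := by simp [Ne.symm hsa]
      simp [List.idxOf_cons, hbeq, hlt, ih hp.2 hst]

-- ===== VERDICT (by name: the statement is the Claim_ definition above) =====
theorem solution_spec : Claim_equal_solution := by
  intro score _
  unfold Spec_solution solution solution_alt
  simp only [List.map_map]
  apply List.map_congr_left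
  intro row hrow
  have hmem : row.sum ∈ score.map (fun i => i.sum) := List.mem_map_of_mem hrow
  set L := score.map (fun i => i.sum) with hL
  set arr := PySem.List.sorted L (fun x => x) true with harr
  have hperm : arr.Perm L := PySem.List.sorted_perm L (fun x => x) true
  have hmemA : row.sum ∈ arr := hperm.mem_iff.mpr hmem
  have hpw : arr.Pairwise (fun a b => b ≤ a) :=
    PySem.List.sorted_pairwise_rev L (fun x => x)
  rw [rank_fold_getD, idxOf_eq_countP_gt arr row.sum hpw hmemA]
  simp only [PySem.Dict.contains_empty, hmemA, if_true,
    hperm.countP_eq, Function.comp]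
  push_cast
  ring
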